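-- pv_equiv track=rewrite | github.com/danielt17/Cryptopals-challenges | Q18.py | detect_aes_ecb
-- ===== SOURCE A (Python) =====
-- def detect_aes_ecb(test):
--     detect = 0
--     for i in range(16):
--         for j in range(16):
--             if i == j:
--                 continue
--             else:
--                 if test[i*8:(i+1)*8] == test[j*8:(j+1)*8]:
--                     detect = 1
--     return detect
-- ===== SOURCE B (Python) =====
-- def detect_aes_ecb(test):
--     blocks = [test[i * 8:(i + 1) * 8] for i in range(16)]
--     seen = []
--     for block in blocks:
--         if block in seen:
--             return 1
--         seen.append(block)
--     return 0
-- ===== Notes on version B (the rewrite author's own statement) =====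
-- stated objective: simpler
-- what changed: Replaces the 16x16 all-pairs slice comparison with a single pass over the 16 blocks that keeps a list of previously encountered blocks and returns 1 at the first repeat.
import Mathlib
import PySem

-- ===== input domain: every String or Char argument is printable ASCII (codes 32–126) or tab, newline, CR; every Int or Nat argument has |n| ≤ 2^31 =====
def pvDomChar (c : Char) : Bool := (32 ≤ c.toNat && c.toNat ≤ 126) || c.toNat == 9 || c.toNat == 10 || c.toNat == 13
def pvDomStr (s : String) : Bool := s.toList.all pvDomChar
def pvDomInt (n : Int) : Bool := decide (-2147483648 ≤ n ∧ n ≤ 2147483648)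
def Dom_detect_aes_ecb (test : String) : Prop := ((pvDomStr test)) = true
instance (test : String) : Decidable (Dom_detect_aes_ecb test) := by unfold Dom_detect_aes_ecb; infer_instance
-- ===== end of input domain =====

-- B replaces A's 16×16 all-pairs comparison of 8-char slices by one pass over the
-- 16 blocks with a 'seen' list, returning 1 at the first repeated block (objective: simpler).

-- ===== PORT A =====
-- literal port: detect = 0; for i in range(16): for j in range(16): skip i==j, set detect=1 on equal slices
def detect_aes_ecb (test : String) : Int :=
  (PySem.List.pyRange 0 16 1).foldl (fun detect i =>
    (PySem.List.pyRange 0 16 1).foldl (fun d j =>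
      if i = j then d
      else if PySem.Str.slice test (some (i * 8)) (some ((i + 1) * 8))
              = PySem.Str.slice test (some (j * 8)) (some ((j + 1) * 8)) then 1 else d)
      detect) 0

-- ===== PORT B =====
-- the 'for block in blocks: if block in seen: return 1; seen.append(block)' loop
def detectGo (seen : List String) : List String → Int
  | [] => 0
  | blk :: rest => if blk ∈ seen then 1 else detectGo (blk :: seen) rest

def detect_aes_ecb_alt (test : String) : Int :=
  let blocks := (PySem.List.pyRange 0 16 1).map
    (fun i => PySem.Str.slice test (some (i * 8)) (some ((i + 1) * 8)))
  detectGo [] blocks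

-- ===== PRECONDITION & SPEC =====
def Spec_detect_aes_ecb (test : String) (out : Int) : Prop := out = detect_aes_ecb_alt test
instance (test : String) (out : Int) : Decidable (Spec_detect_aes_ecb test out) := by unfold Spec_detect_aes_ecb; infer_instance

-- ===== CLAIM (what is proved, stated in full; the proofs are below) =====
def Claim_equal_detect_aes_ecb : Prop := ∀ (test : String), Dom_detect_aes_ecb test → Spec_detect_aes_ecb test (detect_aes_ecb test)

-- ===== LEMMAS AND PROOFS =====

-- a "sticky" fold: d is overwritten to 1 exactly when some element satisfies P
theorem sticky_foldl (P : Int → Prop) [DecidablePred P] (l : List Int) (d : Int) :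
    l.foldl (fun d x => if P x then (1 : Int) else d) d
      = if ∃ x ∈ l, P x then 1 else d := by
  induction l generalizing d with
  | nil => simp
  | cons x l ih =>
    by_cases hx : P x
    · simp [ih, hx]
    · simp [ih, hx]

-- A's inner loop body equals the sticky step function
theorem innerA_eq (test : String) (i : Int) (l : List Int) (d : Int) :
    l.foldl (fun d j =>
        if i = j then d
        else if PySem.Str.slice test (some (i * 8)) (some ((i + 1) * 8))
                = PySem.Str.slice test (some (j * 8)) (some ((j + 1) * 8)) then 1 else d) d
      = l.foldl (fun d j =>
          if i ≠ j ∧ PySem.Str.slice test (some (i * 8)) (some ((i + 1) * 8))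
                = PySem.Str.slice test (some (j * 8)) (some ((j + 1) * 8)) then (1 : Int) else d) d := by
  induction l generalizing d with
  | nil => rfl
  | cons x l ih =>
    simp only [List.foldl_cons]
    rw [ih]
    congr 1
    split_ifs <;> tauto

-- A computes: 1 iff some distinct pair of the 16 blocks coincides
theorem A_char (test : String) :
    detect_aes_ecb test
      = if ∃ i ∈ PySem.List.pyRange 0 16 1, ∃ j ∈ PySem.List.pyRange 0 16 1,
            i ≠ j ∧ PySem.Str.slice test (some (i * 8)) (some ((i + 1) * 8))
                  = PySem.Str.slice test (some (j * 8)) (some ((j + 1) * 8))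
        then 1 else 0 := by
  unfold detect_aes_ecb
  have h1 : ∀ (d : Int),
      (PySem.List.pyRange 0 16 1).foldl (fun detect i =>
        (PySem.List.pyRange 0 16 1).foldl (fun d j =>
          if i = j then d
          else if PySem.Str.slice test (some (i * 8)) (some ((i + 1) * 8))
                  = PySem.Str.slice test (some (j * 8)) (some ((j + 1) * 8)) then 1 else d)
          detect) d
      = (PySem.List.pyRange 0 16 1).foldl (fun detect i =>
          if ∃ j ∈ PySem.List.pyRange 0 16 1,
              i ≠ j ∧ PySem.Str.slice test (some (i * 8)) (some ((i + 1) * 8))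
                    = PySem.Str.slice test (some (j * 8)) (some ((j + 1) * 8)) then (1 : Int) else detect) d := by
    intro d
    apply PySem.List.foldl_congr_mem
    intro acc i _
    rw [innerA_eq, sticky_foldl]
  rw [h1, sticky_foldl]

-- B's loop: returns 1 iff a block repeats (or already lies in seen)
theorem go_char (bs : List String) : ∀ (seen : List String),
    detectGo seen bs = if (∃ x ∈ bs, x ∈ seen) ∨ ¬ bs.Nodup then 1 else 0 := by
  induction bs with
  | nil => intro seen; simp [detectGo]
  | cons x bs ih =>
    intro seen
    by_cases hx : x ∈ seen
    · simp [detectGo, hx]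
    · simp only [detectGo, if_neg hx, ih (x :: seen)]
      congr 1
      simp only [List.mem_cons, List.nodup_cons, eq_iff_iff]
      constructor
      · rintro (⟨y, hy, hxy | hys⟩ | hnd)
        · exact Or.inr (fun h => h.1 (hxy ▸ hy))
        · exact Or.inl ⟨y, Or.inr hy, hys⟩
        · exact Or.inr (fun h => hnd h.2)
      · rintro (⟨y, hy | hy, hys⟩ | hnd)
        · exact absurd (hy ▸ hys) hx
        · exact Or.inl ⟨y, hy, Or.inr hys⟩
        · by_cases hmem : x ∈ bs
          · exact Or.inl ⟨x, hmem, Or.inl rfl⟩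
          · exact Or.inr (fun h => hnd ⟨hmem, h⟩)

-- the all-pairs condition over a nodup index list is exactly non-nodup of the mapped blocks
theorem pairs_iff_not_nodup (b : Int → String) (R : List Int) (hR : R.Nodup) :
    (∃ i ∈ R, ∃ j ∈ R, i ≠ j ∧ b i = b j) ↔ ¬ (R.map b).Nodup := by
  rw [List.Nodup, List.pairwise_map]
  constructor
  · rintro ⟨i, hi, j, hj, hij, hbe⟩ hp
    exact (hp.forall (fun {x y} h hxy => h (hxy.symm)) hi hj hij) hbe
  · intro hnp
    rw [List.pairwise_iff_forall_sublist] at hnp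
    push Not at hnp
    obtain ⟨i, j, hsub, hbe⟩ := hnp
    have hij : i ≠ j := by
      have h2 : List.Nodup [i, j] := hR.sublist hsub
      rw [List.nodup_cons] at h2
      simpa using h2.1
    exact ⟨i, hsub.subset (by simp), j, hsub.subset (by simp), hij, hbe⟩

-- ===== VERDICT (by name: the statement is the Claim_ definition above) =====
theorem detect_aes_ecb_spec : Claim_equal_detect_aes_ecb := by
  intro test _
  unfold Spec_detect_aes_ecb detect_aes_ecb_alt
  rw [A_char, go_char]
  have hiff := pairs_iff_not_nodup
    (fun i => PySem.Str.slice test (some (i * 8)) (some ((i + 1) * 8)))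
    (PySem.List.pyRange 0 16 1) (PySem.List.nodup_pyRange_one 0 16)
  simp only [List.not_mem_nil, and_false, exists_false, false_or, hiff]
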